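-- pv_equiv track=rewrite | github.com/RediSearch/RediSearch | flow-tests/steps/scoring_steps.py | _get_max_term_freq
-- ===== SOURCE A (Python) =====
-- def _get_max_term_freq(text: str) -> int:
--     """Get the maximum frequency of any term in the text."""
--     words = text.lower().split()
--     if not words:
--         return 1
--     freq_count = {}
--     for word in words:
--         freq_count[word] = freq_count.get(word, 0) + 1
--     return max(freq_count.values())
-- ===== SOURCE B (Python) =====
-- def _get_max_term_freq(text: str) -> int:
--     """Get the maximum frequency of any term in the text."""
--     words = sorted(text.lower().split())
--     if not words:
--         return 1
--     best = 0
--     i = 0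
--     n = len(words)
--     while i < n:
--         j = i + 1
--         while j < n and words[j] == words[i]:
--             j += 1
--         if j - i > best:
--             best = j - i
--         i = j
--     return best
-- ===== Notes on version B (the rewrite author's own statement) =====
-- stated objective: alternative
-- what changed: Replaces the frequency dictionary with sort-then-scan: sort the words so equal words are adjacent and take the longest run length in one linear pass, no dict built.
import Mathlib
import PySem

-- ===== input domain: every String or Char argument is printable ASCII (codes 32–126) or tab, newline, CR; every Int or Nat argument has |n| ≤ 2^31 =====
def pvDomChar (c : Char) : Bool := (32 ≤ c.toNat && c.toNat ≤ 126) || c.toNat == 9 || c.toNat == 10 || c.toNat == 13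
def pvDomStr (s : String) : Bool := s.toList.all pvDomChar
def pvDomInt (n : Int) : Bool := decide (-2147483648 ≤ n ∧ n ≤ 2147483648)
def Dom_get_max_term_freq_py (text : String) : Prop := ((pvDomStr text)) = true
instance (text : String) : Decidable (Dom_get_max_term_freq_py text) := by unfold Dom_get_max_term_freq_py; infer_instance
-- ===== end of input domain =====

-- B replaces A's frequency dictionary with sort-then-scan (longest run of equal adjacent words); alternative algorithm, not claimed faster.


-- ===== PORT A =====
def get_max_term_freq_py (text : String) : Int :=
  let words := PySem.Str.split₀ (PySem.Str.lower text)
  if words = [] then 1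
  else
    let freq_count := words.foldl (fun d w => d.insert w (d.getD w 0 + 1)) (PySem.Dict.empty : PySem.Dict String Int)
    match PySem.List.max? freq_count.values (fun v => v) with
    | some m => m
    | none => 0   -- unreachable: words ≠ [] so the dict is nonempty

-- ===== PORT B =====
-- the outer while loop of Source B: take the run of words equal to the head, keep the best run length
def pvRunScan (ws : List String) (best : Int) : Int :=
  match ws with
  | [] => best
  | x :: t =>
      let run : Int := ((t.takeWhile (fun y => y == x)).length + 1 : Nat)
      pvRunScan (t.dropWhile (fun y => y == x)) (if run > best then run else best)
termination_by ws.length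
decreasing_by
  simp only [List.length_cons]
  exact Nat.lt_succ_of_le (List.length_dropWhile_le _ _)

def get_max_term_freq_py_alt (text : String) : Int :=
  let words := PySem.List.sorted (PySem.Str.split₀ (PySem.Str.lower text)) (fun x => x) false
  if words = [] then 1
  else pvRunScan words 0

-- ===== PRECONDITION & SPEC =====
def Spec_get_max_term_freq_py (text : String) (out : Int) : Prop := out = get_max_term_freq_py_alt text
instance (text : String) (out : Int) : Decidable (Spec_get_max_term_freq_py text out) := by unfold Spec_get_max_term_freq_py; infer_instance

-- ===== CLAIM (what is proved, stated in full; the proofs are below) =====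
def Claim_equal_get_max_term_freq_py : Prop := ∀ (text : String), Dom_get_max_term_freq_py text → Spec_get_max_term_freq_py text (get_max_term_freq_py text)

-- ===== LEMMAS AND PROOFS =====

-- the head of a dropWhile does not satisfy the predicate
theorem pv_dropWhile_head_not {α : Type} (p : α → Bool) :
    ∀ (l : List α) {y : α} {ys : List α}, l.dropWhile p = y :: ys → p y = false := by
  intro l
  induction l with
  | nil => intro y ys h; simp [List.dropWhile] at h
  | cons a t ih =>
      intro y ys h
      cases hp : p a with
      | true => exact ih (by simpa [List.dropWhile, hp] using h)
      | false =>
          simp only [List.dropWhile, hp, List.cons.injEq] at h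
          rw [← h.1]; exact hp

-- pushing a fresh element through the Set accumulator
theorem pv_foldl_add_cons {α : Type} [BEq α] [LawfulBEq α] :
    ∀ (l : List α) (s : List α) (x : α), x ∉ l →
      List.foldl PySem.Set.add (x :: s) l = x :: List.foldl PySem.Set.add s l := by
  intro l
  induction l with
  | nil => intro s x _; rfl
  | cons a t ih =>
      intro s x hx
      have hax : (a == x) = false := by
        simp only [beq_eq_false_iff_ne]
        intro h; exact hx (h ▸ List.mem_cons_self)
      have hstep : PySem.Set.add (x :: s) a = x :: PySem.Set.add s a := by
        simp only [PySem.Set.add, PySem.Set.contains, List.contains_cons, hax, Bool.false_or]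
        split_ifs <;> rfl
      rw [List.foldl_cons, hstep, List.foldl_cons,
        ih _ x (fun h => hx (List.mem_cons_of_mem _ h))]

-- dedup of a sorted block: head, its run, then the rest
theorem pv_dedup_block (x : String) (t1 t2 : List String)
    (h1 : ∀ y ∈ t1, y = x) (h2 : x ∉ t2) :
    PySem.List.dedup (x :: (t1 ++ t2)) = x :: PySem.List.dedup t2 := by
  simp only [PySem.List.dedup, PySem.Set.ofList]
  have hadd0 : PySem.Set.add (PySem.Set.empty : PySem.Set String) x = [x] := rfl
  have hfold1 : List.foldl PySem.Set.add [x] t1 = [x] := by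
    induction t1 with
    | nil => rfl
    | cons a t ih =>
        have ha : a = x := h1 a List.mem_cons_self
        have : PySem.Set.add [x] a = [x] := by
          simp [PySem.Set.add, PySem.Set.contains, ha]
        rw [List.foldl_cons, this, ih (fun y hy => h1 y (List.mem_cons_of_mem _ hy))]
  rw [List.foldl_cons, hadd0, List.foldl_append, hfold1]
  exact pv_foldl_add_cons t2 [] x h2

-- the scan over a nondecreasing list computes the running max of the counts of its distinct elements
theorem pv_runScan_eq :
    ∀ (l : List String) (best : Int), l.Pairwise (· ≤ ·) →
      pvRunScan l best =
        (PySem.List.dedup l).foldl (fun acc k => max acc ((l.count k : Int))) best := by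
  intro l best
  induction l, best using pvRunScan.induct with
  | case1 best => intro _; rw [pvRunScan]; rfl
  | case2 best x t run ih =>
      intro hp
      set t1 := t.takeWhile (fun y => y == x) with ht1def
      set t2 := t.dropWhile (fun y => y == x) with ht2def
      have hsplit : t1 ++ t2 = t := List.takeWhile_append_dropWhile
      have ht1 : ∀ y ∈ t1, y = x := fun y hy => by
        have := List.mem_takeWhile_imp hy; simpa [beq_iff_eq] using this
      have hx_le : ∀ y ∈ t, x ≤ y := fun y hy => (List.pairwise_cons.mp hp).1 y hy
      have hpt : t.Pairwise (· ≤ ·) := (List.pairwise_cons.mp hp).2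
      have hpt2 : t2.Pairwise (· ≤ ·) :=
        (List.pairwise_append.mp (hsplit ▸ hpt)).2.1
      -- x does not occur in t2
      have hx2 : x ∉ t2 := by
        cases ht2 : t2 with
        | nil => simp
        | cons h2 t2' =>
            have hh2 : (h2 == x) = false := pv_dropWhile_head_not (fun y => y == x) t (by rw [← ht2def]; exact ht2)
            have hh2x : h2 ≠ x := by simpa [beq_eq_false_iff_ne] using hh2
            have hh2mem : h2 ∈ t := (List.dropWhile_sublist _).mem (ht2 ▸ List.mem_cons_self)
            have hxh2 : x ≤ h2 := hx_le h2 hh2mem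
            intro hxmem
            rcases List.mem_cons.mp hxmem with h | hx'
            · exact hh2x h.symm
            · have : h2 ≤ x := (List.pairwise_cons.mp (ht2 ▸ hpt2)).1 x hx'
              exact hh2x (le_antisymm this hxh2)
      -- the run length is the count of x in the whole list
      have hcnt1 : List.count x t1 = t1.length :=
        List.count_eq_length.mpr (fun y hy => (ht1 y hy).symm)
      have hcnt2 : List.count x t2 = 0 := List.count_eq_zero.mpr hx2
      have hcount_x : List.count x (x :: t) = t1.length + 1 := by
        rw [List.count_cons_self, ← hsplit, List.count_append, hcnt1, hcnt2]
      -- counts of elements of t2 in the whole list are their counts in t2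
      have hcount_t2 : ∀ k ∈ t2, List.count k (x :: t) = List.count k t2 := by
        intro k hk
        have hkx : (x == k) = false := by
          simp only [beq_eq_false_iff_ne]
          intro h; exact hx2 (h ▸ hk)
        have hk_t1 : List.count k t1 = 0 := List.count_eq_zero.mpr
          (fun h => (beq_eq_false_iff_ne.mp hkx) ((ht1 k h).symm))
        rw [List.count_cons, ← hsplit, List.count_append, hk_t1, hkx]
        simp
      -- dedup of the whole list
      have hdedup : PySem.List.dedup (x :: t) = x :: PySem.List.dedup t2 := by
        rw [← hsplit]; exact pv_dedup_block x t1 t2 ht1 hx2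
      -- unfold one step of the scan
      rw [pvRunScan]
      have hrun : run = ((t1.length + 1 : Nat) : Int) := rfl
      simp only [dite_eq_ite, hrun] at ih
      rw [ih hpt2, hdedup, List.foldl_cons]
      have hif : (if (((t1.length + 1 : Nat) : Int)) > best then (((t1.length + 1 : Nat) : Int)) else best)
          = max best ((List.count x (x :: t) : Int)) := by
        rw [hcount_x]; push_cast; omega
      rw [hif]
      exact PySem.List.foldl_congr_mem _ _ _ _ (fun acc k hk => by
        rw [show ((List.count k (x :: t) : Nat) : Int) = ((List.count k t2 : Nat) : Int) from by
          exact_mod_cast hcount_t2 k ((PySem.List.mem_dedup t2 k).mp hk)])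

theorem pv_max_rightComm (c : String → Int) :
    RightCommutative (fun (acc : Int) (k : String) => max acc (c k)) :=
  ⟨fun a k1 k2 => max_right_comm a (c k1) (c k2)⟩

theorem get_max_term_freq_py_spec : Claim_equal_get_max_term_freq_py := by
  intro text _
  unfold Spec_get_max_term_freq_py get_max_term_freq_py get_max_term_freq_py_alt
  set words := PySem.Str.split₀ (PySem.Str.lower text) with hw
  by_cases hnil : words = []
  · simp [hnil, PySem.List.sorted_eq_nil_iff]
  · have hsnil : PySem.List.sorted words (fun x => x) false ≠ [] := by
      simpa [PySem.List.sorted_eq_nil_iff] using hnil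
    simp only [hnil, hsnil]
    set l := PySem.List.sorted words (fun x => x) false with hl
    have hperm : l.Perm words := PySem.List.sorted_perm words (fun x => x) false
    -- A side: the dict is the counter, its values are the counts of the distinct words
    rw [PySem.Dict.foldl_insert_getD_add_one_eq_counter]
    have hvals : (PySem.Dict.counter words).values
        = (PySem.Set.ofList words).map (fun k => ((words.count k : Int))) := by
      simp only [PySem.Dict.values, PySem.Dict.items_counter, List.map_map]
      rfl
    -- B side: the scan is the running max of counts over dedup l
    have hpw : l.Pairwise (· ≤ ·) := PySem.List.sorted_pairwise words (fun x => x)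
    rw [pv_runScan_eq l 0 hpw]
    -- counts in l equal counts in words
    have hcnt : ∀ k, ((l.count k : Nat) : Int) = ((words.count k : Nat) : Int) := fun k => by
      exact_mod_cast hperm.count_eq k
    -- dedup l is a permutation of dedup words = Set.ofList words
    have hdperm : (PySem.List.dedup l).Perm (PySem.Set.ofList words) := by
      rw [(List.perm_ext_iff_of_nodup (PySem.List.nodup_dedup l) (PySem.Set.nodup_ofList words))]
      intro a
      rw [PySem.List.mem_dedup, PySem.Set.mem_ofList, hperm.mem_iff]
    have hBfold : (PySem.List.dedup l).foldl (fun acc k => max acc ((l.count k : Int))) 0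
        = (PySem.Set.ofList words).foldl (fun acc k => max acc ((words.count k : Int))) 0 := by
      rw [PySem.List.foldl_congr_mem _ _ (fun acc k => max acc ((words.count k : Int))) _
        (fun acc k _ => by rw [hcnt k])]
      exact @List.Perm.foldl_eq _ _ _ _ _ (pv_max_rightComm (fun k => (words.count k : Int))) hdperm 0
    rw [hBfold, hvals]
    -- evaluate A's max over the nonempty value list
    have hne : PySem.Set.ofList words ≠ [] := by
      obtain ⟨w, t, hwc⟩ := List.exists_cons_of_ne_nil hnil
      have hmem : w ∈ PySem.Set.ofList words :=
        (PySem.Set.mem_ofList words w).mpr (hwc ▸ List.mem_cons_self)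
      intro h; rw [h] at hmem; exact List.not_mem_nil hmem
    obtain ⟨k0, kr, hk⟩ := List.exists_cons_of_ne_nil hne
    rw [hk, List.map_cons, PySem.List.max?_id_cons, List.foldl_map, List.foldl_cons]
    have hmax0 : max 0 ((words.count k0 : Int)) = (words.count k0 : Int) := by
      have : (0:Int) ≤ (words.count k0 : Int) := Int.natCast_nonneg _
      omega
    rw [hmax0]
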